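-- pv_equiv track=rewrite | github.com/ArthurBrasa/Estruturas_de_Dados | Exercicios/media_movel.py | especial
-- ===== SOURCE A (Python) =====
-- class Queue:
--     def __init__(self, fila=[]):
--         self.items = fila
--
--     def getItems(self):
--         return self.items[:]
--
--     def isEmpty(self):
--         return self.items == []
--
--     def __str__(self) -> str:
--         return str(self.items)
--
--     def enqueue(self, item):
--         self.items.insert(0,item)
--
--     def dequeue(self):
--         try:
--             return self.items.pop()
--         except:
--             return None
--
--     def peek(self):
--         try:
--             return self.items[len(self.items) - 1]
--         except IndexError:
--             pass
--
--     def size(self):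
--         return len(self.items)
--
-- def especial(fila):
--     novaFila = []
--     aux = Queue(fila)
--     for i in range(0, aux.size()):
--         idade = aux.dequeue()
--         if idade >= 60:
--             novaFila.append((idade, i+1))
--     return novaFila[::-1]
-- ===== SOURCE B (Python) =====
-- def especial(fila):
--     n = len(fila)
--     return [(idade, n - j) for j, idade in enumerate(fila) if idade >= 60]
-- ===== Notes on version B (the rewrite author's own statement) =====
-- stated objective: simpler
-- what changed: Replaced the Queue class, the index-driven dequeue loop and the final [::-1] reversal with one list comprehension over enumerate(fila) that emits (idade, n - j) directly in forward order; B also does not mutate fila (A empties it via the aliased queue).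
import Mathlib
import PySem

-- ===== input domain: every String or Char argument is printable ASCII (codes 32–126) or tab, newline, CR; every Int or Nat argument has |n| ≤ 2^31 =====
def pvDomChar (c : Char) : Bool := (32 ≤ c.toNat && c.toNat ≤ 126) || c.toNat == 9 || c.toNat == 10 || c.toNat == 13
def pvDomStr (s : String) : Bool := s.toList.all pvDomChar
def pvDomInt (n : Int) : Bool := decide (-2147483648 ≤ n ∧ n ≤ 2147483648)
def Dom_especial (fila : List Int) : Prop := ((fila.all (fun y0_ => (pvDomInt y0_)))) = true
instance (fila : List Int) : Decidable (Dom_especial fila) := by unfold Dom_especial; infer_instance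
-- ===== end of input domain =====

-- B is a single comprehension over enumerate with position n-j, instead of A's Queue dequeue loop
-- plus final reversal; equivalence is about the RETURN value only (A empties the list `fila`
-- in place via the aliased Queue, B does not mutate it).

-- ===== PORT A =====
-- one loop iteration: idade = aux.dequeue(); if idade >= 60: novaFila.append((idade, i+1))
-- (the `none` branch of pop? is Python's dequeue-on-empty returning None; unreachable here
--  since the loop runs exactly size-of-queue times)
def especialStep (st : List Int × List (Int × Int)) (i : Int) : List Int × List (Int × Int) :=
  match PySem.List.pop? st.1 (-1) with
  | some (idade, rest) =>
      (rest, if 60 ≤ idade then st.2 ++ [(idade, i + 1)] else st.2)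
  | none => (st.1, st.2)

def especial (fila : List Int) : List (Int × Int) :=
  let aux := fila
  let r := (PySem.List.pyRange 0 (aux.length : Int) 1).foldl especialStep (aux, [])
  -- novaFila[::-1]  (PySem.List.slice?_none_none_neg_one: step -1 full slice is reverse)
  r.2.reverse

-- ===== PORT B =====
def especial_alt (fila : List Int) : List (Int × Int) :=
  let n : Int := fila.length
  (PySem.List.enumerate fila 0).filterMap
    (fun q => if 60 ≤ q.2 then some (q.2, n - q.1) else none)

-- ===== PRECONDITION & SPEC =====
def Spec_especial (fila : List Int) (out : List (Int × Int)) : Prop := out = especial_alt fila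
instance (fila : List Int) (out : List (Int × Int)) : Decidable (Spec_especial fila out) := by unfold Spec_especial; infer_instance

-- ===== CLAIM (what is proved, stated in full; the proofs are below) =====
def Claim_equal_especial : Prop := ∀ (fila : List Int), Dom_especial fila → Spec_especial fila (especial fila)

-- ===== LEMMAS AND PROOFS =====

-- A's dequeue loop, generalized: starting the range at s with queue l and accumulator acc,
-- it empties the queue and appends the ≥60 pairs (position s + |l| - index) in back-to-front order.
theorem especial_loop (l : List Int) : ∀ (s : Int) (acc : List (Int × Int)),
    (PySem.List.pyRange s (s + (l.length : Int)) 1).foldl especialStep (l, acc)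
    = ([], acc ++ ((PySem.List.enumerate l 0).filterMap
        (fun q => if 60 ≤ q.2 then some (q.2, s + (l.length : Int) - q.1) else none)).reverse) := by
  induction l using List.reverseRecOn with
  | nil =>
      intro s acc
      simp [PySem.List.pyRange_one_eq_nil, PySem.List.enumerate_nil]
  | append_singleton ys y ih =>
      intro s acc
      have hlen : (((ys ++ [y]).length : Int)) = (ys.length : Int) + 1 := by
        simp
      have hcons : PySem.List.pyRange s (s + ((ys ++ [y]).length : Int)) 1
          = s :: PySem.List.pyRange (s + 1) (s + ((ys ++ [y]).length : Int)) 1 := by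
        apply PySem.List.pyRange_one_cons
        omega
      rw [hcons]
      simp only [List.foldl_cons]
      have hstep : especialStep (ys ++ [y], acc) s
          = (ys, if 60 ≤ y then acc ++ [(y, s + 1)] else acc) := by
        simp [especialStep, PySem.List.pop?_last]
      rw [hstep]
      have hrange : s + ((ys ++ [y]).length : Int) = (s + 1) + (ys.length : Int) := by
        rw [hlen]; ring
      rw [hrange, ih (s + 1)]
      have henum : PySem.List.enumerate (ys ++ [y]) 0
          = PySem.List.enumerate ys 0 ++ [((ys.length : Int), y)] := by
        rw [PySem.List.enumerate_append]
        simp [PySem.List.enumerate_cons]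
      rw [henum]
      by_cases hy : 60 ≤ y <;>
        simp [List.filterMap_append, List.reverse_append, hy]

-- ===== VERDICT (by name: the statement is the Claim_ definition above) =====
theorem especial_spec : Claim_equal_especial := by
  intro fila _
  unfold Spec_especial especial especial_alt
  have h := especial_loop fila 0 []
  simp only [zero_add] at h
  simp only [h]
  simp
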